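-- pv_equiv track=rewrite | github.com/RahatKarim1795/tutorial_tanjil | rahat_work/lab7/lab7_v3.py | find_neighbor_values
-- ===== SOURCE A (Python) =====
-- def find_neighbor_values(grid: list[list[int]], row: int, col: int) -> list[int]:
--     neighbors_list = []
--
--     total_rows = len(grid)
--     total_columns = len(grid[0])
--
--     # Check the eight possible neighbor positions around the given row and column
--     neighbor_positions = [
--         (row - 1, col - 1), (row - 1, col), (row - 1, col + 1),
--         (row, col - 1),(row, col + 1), (row + 1, col - 1),
--         (row + 1, col), (row + 1, col + 1)
--     ]
--
--     for row, column in neighbor_positions: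
--
--         if (row>=0) and (row<total_rows) and (column>=0) and (column<total_columns):
--
--             neighbors_list.append(grid[row][column])
--
--     return neighbors_list
-- ===== SOURCE B (Python) =====
-- def find_neighbor_values(grid: list[list[int]], row: int, col: int) -> list[int]:
--     n_rows = len(grid)
--     n_cols = len(grid[0])
--     r0, r1 = max(0, row - 1), min(n_rows, row + 2)
--     c0, c1 = max(0, col - 1), min(n_cols, col + 2)
--     out = []
--     for r in range(r0, r1):
--         for c in range(c0, c1):
--             if r != row or c != col:
--                 out.append(grid[r][c])
--     return out
-- ===== Notes on version B (the rewrite author's own statement) =====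
-- stated objective: idiomatic
-- what changed: B replaces A's list of eight explicit neighbor tuples each with a four-way bounds test by a single clamped bounding window (max/min) traversed with two nested range loops that skip only the center cell.
import Mathlib
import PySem

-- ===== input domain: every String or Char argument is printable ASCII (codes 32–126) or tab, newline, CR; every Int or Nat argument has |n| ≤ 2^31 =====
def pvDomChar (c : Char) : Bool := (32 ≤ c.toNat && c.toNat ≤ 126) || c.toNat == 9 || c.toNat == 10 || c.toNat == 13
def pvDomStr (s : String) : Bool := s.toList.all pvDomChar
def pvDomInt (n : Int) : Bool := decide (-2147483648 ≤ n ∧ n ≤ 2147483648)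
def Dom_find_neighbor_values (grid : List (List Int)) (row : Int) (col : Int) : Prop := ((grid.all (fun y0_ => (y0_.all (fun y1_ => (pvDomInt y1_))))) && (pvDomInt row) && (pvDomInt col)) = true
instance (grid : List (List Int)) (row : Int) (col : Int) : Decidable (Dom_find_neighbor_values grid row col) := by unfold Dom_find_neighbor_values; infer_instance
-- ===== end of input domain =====

-- B replaces A's eight explicit neighbor tuples (each with a four-way bounds test) by one
-- clamped bounding window scanned with two nested range loops skipping only the center cell
-- (objective: idiomatic; same values in the same raster order).

-- shared cell access grid[r][c]: both Pythons do exactly this subscript, and both only reach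
-- it with indices already checked nonnegative (A's guard / B's clamped window), so getD is exact
def pvCell (grid : List (List Int)) (r c : Int) : Int :=
  (grid.getD r.toNat []).getD c.toNat 0

-- ===== PORT A =====
def find_neighbor_values (grid : List (List Int)) (row : Int) (col : Int) : List Int :=
  let total_rows : Int := grid.length
  let total_columns : Int := (grid.headI).length
  let neighbor_positions : List (Int × Int) :=
    [(row - 1, col - 1), (row - 1, col), (row - 1, col + 1),
     (row, col - 1), (row, col + 1), (row + 1, col - 1),
     (row + 1, col), (row + 1, col + 1)]
  neighbor_positions.foldl
    (fun acc rc =>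
      if 0 ≤ rc.1 ∧ rc.1 < total_rows ∧ 0 ≤ rc.2 ∧ rc.2 < total_columns then
        acc ++ [pvCell grid rc.1 rc.2]
      else acc) []

-- ===== PORT B =====
def find_neighbor_values_alt (grid : List (List Int)) (row : Int) (col : Int) : List Int :=
  let n_rows : Int := grid.length
  let n_cols : Int := (grid.headI).length
  let r0 : Int := max 0 (row - 1)
  let r1 : Int := min n_rows (row + 2)
  let c0 : Int := max 0 (col - 1)
  let c1 : Int := min n_cols (col + 2)
  (PySem.List.pyRange r0 r1 1).foldl
    (fun acc r =>
      (PySem.List.pyRange c0 c1 1).foldl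
        (fun acc2 c =>
          if r ≠ row ∨ c ≠ col then acc2 ++ [pvCell grid r c] else acc2)
        acc)
    []

-- ===== PRECONDITION & SPEC =====
-- Pre_ excludes exactly the inputs on which the Python A raises IndexError: the empty grid
-- (grid[0]) and ragged grids where an in-window neighbor column index, valid against
-- len(grid[0]), exceeds the length of the (shorter) row actually accessed (B raises there too).
def Pre_find_neighbor_values (grid : List (List Int)) (row : Int) (col : Int) : Prop :=
  grid ≠ [] ∧
  ∀ r ∈ [row - 1, row, row + 1], ∀ c ∈ [col - 1, col, col + 1],
    ¬(r = row ∧ c = col) → 0 ≤ r → r < (grid.length : Int) →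
    0 ≤ c → c < ((grid.headI).length : Int) →
    c < ((grid.getD r.toNat []).length : Int)
instance (grid : List (List Int)) (row : Int) (col : Int) : Decidable (Pre_find_neighbor_values grid row col) := by unfold Pre_find_neighbor_values; infer_instance
def pvWitness_find_neighbor_values : List (List Int) × Int × Int := ([[1, 2], [3, 4]], 0, 0)

def Spec_find_neighbor_values (grid : List (List Int)) (row : Int) (col : Int) (out : List Int) : Prop := out = find_neighbor_values_alt grid row col
instance (grid : List (List Int)) (row : Int) (col : Int) (out : List Int) : Decidable (Spec_find_neighbor_values grid row col out) := by unfold Spec_find_neighbor_values; infer_instance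

-- ===== CLAIM (what is proved, stated in full; the proofs are below) =====
def Claim_equal_find_neighbor_values : Prop := ∀ (grid : List (List Int)) (row : Int) (col : Int), Dom_find_neighbor_values grid row col → Pre_find_neighbor_values grid row col → Spec_find_neighbor_values grid row col (find_neighbor_values grid row col)

-- ===== LEMMAS AND PROOFS =====

-- a clamped window over three consecutive integers is the in-range filter of those three
lemma pvRange3 (n x : Int) (hn : 0 ≤ n) :
    PySem.List.pyRange (max 0 (x - 1)) (min n (x + 2)) 1
      = List.filter (fun t => decide (0 ≤ t ∧ t < n)) [x - 1, x, x + 1] := by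
  rw [PySem.List.pyRange_one]
  have hm3 : (min n (x + 2) - max 0 (x - 1)).toNat ≤ 3 := by omega
  set m := (min n (x + 2) - max 0 (x - 1)).toNat with hmdef
  have hm : m = (min n (x + 2) - max 0 (x - 1)).toNat := hmdef
  clear_value m
  interval_cases m <;>
    simp [List.range_succ, List.filter] <;>
    repeat' split <;> simp_all <;> try omega

-- a guarded-append fold is a filter-then-map
lemma pvFoldAppIte {a b : Type} (l : List a) (p : a → Prop) [DecidablePred p] (f : a → b) (acc : List b) :
    l.foldl (fun s x => if p x then s ++ [f x] else s) acc
      = acc ++ (l.filter (fun x => decide (p x))).map f := by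
  induction l generalizing acc with
  | nil => simp
  | cons h t ih =>
      by_cases hp : p h <;> simp [List.foldl_cons, hp, ih]

-- B in canonical form: flatMap over the filtered row window
lemma pvAltCanon (grid : List (List Int)) (row col : Int) :
    find_neighbor_values_alt grid row col
      = (List.filter (fun r => decide (0 ≤ r ∧ r < (grid.length : Int))) [row - 1, row, row + 1]).flatMap
          (fun r =>
            ((List.filter (fun c => decide (0 ≤ c ∧ c < ((grid.headI).length : Int))) [col - 1, col, col + 1]).filter
                (fun c => decide (r ≠ row ∨ c ≠ col))).map (fun c => pvCell grid r c)) := by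
  simp only [find_neighbor_values_alt, pvRange3 _ _ (Int.natCast_nonneg _)]
  rw [show (fun (acc : List Int) r =>
        (List.filter (fun c => decide (0 ≤ c ∧ c < ((grid.headI).length : Int))) [col - 1, col, col + 1]).foldl
          (fun acc2 c => if r ≠ row ∨ c ≠ col then acc2 ++ [pvCell grid r c] else acc2) acc)
      = (fun acc r => acc ++
          ((List.filter (fun c => decide (0 ≤ c ∧ c < ((grid.headI).length : Int))) [col - 1, col, col + 1]).filter
              (fun c => decide (r ≠ row ∨ c ≠ col))).map (fun c => pvCell grid r c))
    from funext fun acc => funext fun r => pvFoldAppIte _ _ _ _]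
  rw [PySem.List.foldl_append_eq_flatMap]
  simp

-- A in canonical form: filter-then-map over the eight positions
lemma pvACanon (grid : List (List Int)) (row col : Int) :
    find_neighbor_values grid row col
      = (([(row - 1, col - 1), (row - 1, col), (row - 1, col + 1),
           (row, col - 1), (row, col + 1), (row + 1, col - 1),
           (row + 1, col), (row + 1, col + 1)] : List (Int × Int)).filter
          (fun rc => decide (0 ≤ rc.1 ∧ rc.1 < (grid.length : Int) ∧ 0 ≤ rc.2 ∧ rc.2 < ((grid.headI).length : Int)))).map
        (fun rc => pvCell grid rc.1 rc.2) := by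
  simp only [find_neighbor_values]
  rw [pvFoldAppIte]
  simp

-- one side row (r ≠ row) of A's eight positions as a window row
lemma pvRowSeg (grid : List (List Int)) (N M r col : Int) :
    (([(r, col - 1), (r, col), (r, col + 1)] : List (Int × Int)).filter
        (fun rc => decide (0 ≤ rc.1 ∧ rc.1 < N ∧ 0 ≤ rc.2 ∧ rc.2 < M))).map
      (fun rc => pvCell grid rc.1 rc.2)
    = if 0 ≤ r ∧ r < N then
        (List.filter (fun c => decide (0 ≤ c ∧ c < M)) [col - 1, col, col + 1]).map
          (fun c => pvCell grid r c)
      else [] := by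
  by_cases hR : 0 ≤ r ∧ r < N <;>
  by_cases hC1 : 0 ≤ col - 1 ∧ col - 1 < M <;>
  by_cases hC2 : 0 ≤ col ∧ col < M <;>
  by_cases hC3 : 0 ≤ col + 1 ∧ col + 1 < M <;>
  simp_all

-- the middle row of A's eight positions as a window row minus the center
lemma pvRowMid (grid : List (List Int)) (N M row col : Int) :
    (([(row, col - 1), (row, col + 1)] : List (Int × Int)).filter
        (fun rc => decide (0 ≤ rc.1 ∧ rc.1 < N ∧ 0 ≤ rc.2 ∧ rc.2 < M))).map
      (fun rc => pvCell grid rc.1 rc.2)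
    = if 0 ≤ row ∧ row < N then
        ((List.filter (fun c => decide (0 ≤ c ∧ c < M)) [col - 1, col, col + 1]).filter
            (fun c => decide (¬c = col))).map (fun c => pvCell grid row c)
      else [] := by
  have hne3 : col - 1 ≠ col := by omega
  have hne4 : col + 1 ≠ col := by omega
  by_cases hR : 0 ≤ row ∧ row < N <;>
  by_cases hC1 : 0 ≤ col - 1 ∧ col - 1 < M <;>
  by_cases hC2 : 0 ≤ col ∧ col < M <;>
  by_cases hC3 : 0 ≤ col + 1 ∧ col + 1 < M <;>
  simp_all

set_option maxHeartbeats 1000000 in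
lemma find_neighbor_values_eq (grid : List (List Int)) (row col : Int) :
    find_neighbor_values grid row col = find_neighbor_values_alt grid row col := by
  have hne1 : row - 1 ≠ row := by omega
  have hne2 : row + 1 ≠ row := by omega
  rw [pvACanon, pvAltCanon]
  rw [show ([(row - 1, col - 1), (row - 1, col), (row - 1, col + 1),
             (row, col - 1), (row, col + 1), (row + 1, col - 1),
             (row + 1, col), (row + 1, col + 1)] : List (Int × Int))
        = [(row - 1, col - 1), (row - 1, col), (row - 1, col + 1)] ++
          [(row, col - 1), (row, col + 1)] ++
          [(row + 1, col - 1), (row + 1, col), (row + 1, col + 1)] from rfl,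
      List.filter_append, List.filter_append, List.map_append, List.map_append,
      pvRowSeg, pvRowMid, pvRowSeg]
  by_cases hR1 : 0 ≤ row - 1 ∧ row - 1 < (grid.length : Int) <;>
  by_cases hR2 : 0 ≤ row ∧ row < (grid.length : Int) <;>
  by_cases hR3 : 0 ≤ row + 1 ∧ row + 1 < (grid.length : Int) <;>
  simp [hR1, hR2, hR3] <;> split_ifs <;> first | rfl | omega | simp_all

-- ===== VERDICT (by name: the statement is the Claim_ definition above) =====
theorem find_neighbor_values_spec : Claim_equal_find_neighbor_values := by
  intro grid row col _ _
  exact find_neighbor_values_eq grid row col
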